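-- pv_equiv track=rewrite | github.com/abdallah1016126/TwitterSentimentAnalysis | 2- Data Preprocessing and Feature Generation/Phase 2 Final.py | bigramNegationWords
-- ===== SOURCE A (Python) =====
-- negationWords = ['not', 'no', 'never']
--
-- def bigramNegationWords(words):
--     l = []
--     metNegation = False
--     bigram = ''
--     for w in words:
--         if w in negationWords:
--             if metNegation == False:
--                 bigram += 'not'
--                 metNegation = True
--             else:
--                 continue
--         else:
--             if metNegation == True:
--                 bigram += w
--                 l.append(bigram)
--                 metNegation = False
--                 bigram = ''
--             else:
--                 l.append(w)
--     return l
-- ===== SOURCE B (Python) =====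
-- negationWords = ['not', 'no', 'never']
--
-- def bigramNegationWords(words):
--     result = []
--     it = iter(words)
--     for w in it:
--         if w not in negationWords:
--             result.append(w)
--         else:
--             for nxt in it:
--                 if nxt not in negationWords:
--                     result.append('not' + nxt)
--                     break
--     return result
-- ===== Notes on version B (the rewrite author's own statement) =====
-- stated objective: idiomatic
-- what changed: Replaced the flag-and-accumulated-string state machine with a shared-iterator consumer: an inner loop over the same iterator skips consecutive negation words and attaches 'not' to the first following word, so no metNegation flag or partial bigram string is carried.
import Mathlib
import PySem

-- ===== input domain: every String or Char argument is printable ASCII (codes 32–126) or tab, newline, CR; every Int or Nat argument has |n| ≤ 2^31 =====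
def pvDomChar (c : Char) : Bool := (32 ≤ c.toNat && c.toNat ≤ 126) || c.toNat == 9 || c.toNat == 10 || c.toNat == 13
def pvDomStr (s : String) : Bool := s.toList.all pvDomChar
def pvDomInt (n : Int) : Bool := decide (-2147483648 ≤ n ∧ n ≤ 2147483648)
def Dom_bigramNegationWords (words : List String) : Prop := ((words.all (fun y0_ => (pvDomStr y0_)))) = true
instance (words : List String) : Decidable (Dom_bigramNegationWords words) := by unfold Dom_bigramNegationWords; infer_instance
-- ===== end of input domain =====

-- B replaces A's flag-and-partial-bigram state machine with a shared-iterator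
-- consumer (nested loops over one iterator); same O(n) cost, more idiomatic.

def negationWords : List String := ["not", "no", "never"]

-- ===== PORT A =====
-- A's loop carries (l, metNegation, bigram); l.append is back-append.
def bigramNegationWords (words : List String) : List String :=
  (words.foldl
    (fun (s : List String × Bool × String) w =>
      let (l, metNegation, bigram) := s
      if negationWords.contains w then
        if metNegation = false then (l, true, bigram ++ "not")
        else (l, metNegation, bigram)
      else
        if metNegation = true then (l ++ [bigram ++ w], false, "")
        else (l ++ [w], metNegation, bigram))
    ([], false, "")).1

-- ===== PORT B =====
-- B's outer `for w in it` / inner `for nxt in it` over one shared iterator,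
-- as a mutual recursion over the remaining words.
mutual
def bOuter : List String → List String
  | [] => []
  | w :: rest =>
    if negationWords.contains w then bInner rest
    else w :: bOuter rest
def bInner : List String → List String
  | [] => []
  | nxt :: rest =>
    if negationWords.contains nxt then bInner rest
    else ("not" ++ nxt) :: bOuter rest
end

def bigramNegationWords_alt (words : List String) : List String := bOuter words

-- ===== PRECONDITION & SPEC =====
def Spec_bigramNegationWords (words : List String) (out : List String) : Prop := out = bigramNegationWords_alt words
instance (words : List String) (out : List String) : Decidable (Spec_bigramNegationWords words out) := by unfold Spec_bigramNegationWords; infer_instance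

-- ===== CLAIM (what is proved, stated in full; the proofs are below) =====
def Claim_equal_bigramNegationWords : Prop := ∀ (words : List String), Dom_bigramNegationWords words → Spec_bigramNegationWords words (bigramNegationWords words)

-- ===== LEMMAS AND PROOFS =====

-- Invariant: from state (l,false,"") A's fold produces l ++ bOuter rest;
-- from state (l,true,"not") it produces l ++ bInner rest.
theorem foldA_inv (words : List String) : ∀ (l : List String),
    (words.foldl
      (fun (s : List String × Bool × String) w =>
        let (l, metNegation, bigram) := s
        if negationWords.contains w then
          if metNegation = false then (l, true, bigram ++ "not")
          else (l, metNegation, bigram)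
        else
          if metNegation = true then (l ++ [bigram ++ w], false, "")
          else (l ++ [w], metNegation, bigram))
      (l, false, "")).1 = l ++ bOuter words
    ∧
    (words.foldl
      (fun (s : List String × Bool × String) w =>
        let (l, metNegation, bigram) := s
        if negationWords.contains w then
          if metNegation = false then (l, true, bigram ++ "not")
          else (l, metNegation, bigram)
        else
          if metNegation = true then (l ++ [bigram ++ w], false, "")
          else (l ++ [w], metNegation, bigram))
      (l, true, "not")).1 = l ++ bInner words := by
  induction words with
  | nil => intro l; simp [bOuter, bInner]
  | cons w rest ih =>
    intro l
    by_cases h : w ∈ negationWords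
    · simp [List.foldl, List.contains_eq_mem, h, bOuter, bInner]
      have := (ih l).2
      simpa [List.contains_eq_mem] using this
    · simp [List.foldl, List.contains_eq_mem, h, bOuter, bInner]
      constructor
      · have := (ih (l ++ [w])).1
        simpa [List.contains_eq_mem] using this
      · have := (ih (l ++ ["not" ++ w])).1
        simpa [List.contains_eq_mem] using this

-- ===== VERDICT (by name: the statement is the Claim_ definition above) =====
theorem bigramNegationWords_spec : Claim_equal_bigramNegationWords := by
  intro words _
  unfold Spec_bigramNegationWords bigramNegationWords bigramNegationWords_alt
  simpa using (foldA_inv words []).1
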